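-- pv_equiv track=rewrite | github.com/seeds-hotpack/algorithm-study | 백준/20057/solve.py | tornado_move
-- ===== SOURCE A (Python) =====
-- from collections import deque
-- from itertools import chain, repeat
--
-- def tornado_move(N):
--     order = deque([0, 1, 2, 3])
--     lengths = list(chain.from_iterable(repeat(k, 2) for k in range(1, N)))
--     lengths.append(N - 1)
--     for length in lengths:
--         d = order[0]
--         for _ in range(length):
--             yield d
--         order.rotate(-1)
-- ===== SOURCE B (Python) =====
-- def tornado_move(N):
--     if N < 1:
--         return
--     s = 0
--     mid = 0      # s*(s+1): first index of the second (even-run) half of ring s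
--     nxt = 1      # (s+1)*(s+1): first index of ring s+1
--     d_lo = 3     # (2*s - 1) % 4, direction while j < mid
--     d_hi = 0     # (2*s) % 4, direction while mid <= j < nxt
--     for j in range(N * N - 1):
--         if nxt <= j:
--             s += 1
--             mid = s * s + s
--             nxt = mid + s + 1
--             d_lo = (2 * s - 1) % 4
--             d_hi = (2 * s) % 4
--         yield d_lo if j < mid else d_hi
-- ===== Notes on version B (the rewrite author's own statement) =====
-- stated objective: alternative
-- what changed: Replaces run emission (rotating deque over a prebuilt lengths list) with a flat loop over all N*N-1 positions that computes each element's direction in closed form from an incrementally maintained integer square root of the index.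
import Mathlib
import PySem

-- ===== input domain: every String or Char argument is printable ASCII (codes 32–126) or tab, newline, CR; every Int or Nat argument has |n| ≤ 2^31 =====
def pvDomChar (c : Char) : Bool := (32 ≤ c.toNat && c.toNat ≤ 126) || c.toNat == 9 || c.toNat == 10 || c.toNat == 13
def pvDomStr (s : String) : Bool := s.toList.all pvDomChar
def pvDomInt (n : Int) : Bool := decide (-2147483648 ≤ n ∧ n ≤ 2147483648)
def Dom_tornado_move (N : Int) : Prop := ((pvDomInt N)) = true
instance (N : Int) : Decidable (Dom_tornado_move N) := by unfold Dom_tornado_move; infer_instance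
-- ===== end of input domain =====

-- B replaces A's run emission (rotating deque over a prebuilt lengths list) by a flat loop
-- over the N*N-1 positions, computing each direction in closed form from an incrementally
-- maintained integer square root of the index (objective: alternative algorithm, same cost).

-- ===== PORT A =====
-- deque.rotate(-1) : first element moves to the back
def pvRotL (l : List Int) : List Int := l.drop 1 ++ l.take 1

-- one loop iteration; the yielded run is accumulated front-first (reversed once at the end)
def pvStepARev (st : List Int × List Int) (length : Int) : List Int × List Int :=
  let d := st.1.headD 0   -- order[0]; order is always nonempty
  (pvRotL st.1, List.replicate length.toNat d ++ st.2)

def tornado_move (N : Int) : List Int :=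
  -- lengths = list(chain.from_iterable(repeat(k, 2) for k in range(1, N))); lengths.append(N-1)
  let lengths : List Int := ((PySem.List.pyRange 1 N 1).flatMap (fun k => [k, k])) ++ [N - 1]
  -- for length in lengths: d = order[0]; yield d (length times); order.rotate(-1)
  ((lengths.foldl pvStepARev ([0, 1, 2, 3], [])).2).reverse

-- ===== PORT B =====
-- one loop iteration of B: maybe advance to the next ring (s, with its cached boundary
-- mid = s*s+s, next-ring start nxt, and the two cached directions), then yield; the
-- yields are accumulated front-first and reversed once at the end
def pvStepBRev (st : (Int × Int × Int × Int × Int) × List Int) (j : Int) :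
    (Int × Int × Int × Int × Int) × List Int :=
  let c := if st.1.2.2.1 ≤ j then
      -- s += 1; mid = s*s + s; nxt = mid + s + 1; d_lo = (2*s-1) % 4; d_hi = (2*s) % 4
      let s := st.1.1 + 1
      let mid := s * s + s
      (s, mid, mid + s + 1, PySem.Int.mod (2 * s - 1) 4, PySem.Int.mod (2 * s) 4)
    else st.1
  (c, (if j < c.2.1 then c.2.2.2.1 else c.2.2.2.2) :: st.2)

def tornado_move_alt (N : Int) : List Int :=
  -- if N < 1: return; (s, mid, nxt, d_lo, d_hi) = (0, 0, 1, 3, 0)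
  -- for j in range(N*N - 1): advance/yield as in pvStepBRev
  if N < 1 then []
  else (((PySem.List.pyRange 0 (N * N - 1) 1).foldl pvStepBRev ((0, 0, 1, 3, 0), [])).2).reverse

-- ===== PRECONDITION & SPEC =====
def Spec_tornado_move (N : Int) (out : List Int) : Prop := out = tornado_move_alt N
instance (N : Int) (out : List Int) : Decidable (Spec_tornado_move N out) := by unfold Spec_tornado_move; infer_instance

-- ===== CLAIM (what is proved, stated in full; the proofs are below) =====
def Claim_equal_tornado_move : Prop := ∀ (N : Int), Dom_tornado_move N → Spec_tornado_move N (tornado_move N)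

-- ===== LEMMAS AND PROOFS =====

-- the closed-form direction of position j, and the canonical output of length M
def pvG (j : ℕ) : ℤ :=
  let s : ℤ := (Nat.sqrt j : ℤ)
  PySem.Int.mod (if (j : ℤ) < s * (s + 1) then 2 * s - 1 else 2 * s) 4

def pvCanon (M : ℕ) : List ℤ := (List.range M).map pvG

-- A's loop step and B's loop step, named for the lemmas
def pvStepA (st : List Int × List Int) (length : Int) : List Int × List Int :=
  let d := st.1.headD 0
  (pvRotL st.1, st.2 ++ List.replicate length.toNat d)

-- intermediate pair-run form of A's output (used only in the proof)
def pvStepB (st : Int × List Int) (k : Int) : Int × List Int :=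
  let d1 := PySem.Int.mod (st.1 + 1) 4
  (PySem.Int.mod (d1 + 1) 4,
   st.2 ++ List.replicate k.toNat st.1 ++ List.replicate k.toNat d1)

def pvPairs (N : Int) : List Int :=
  let st := (PySem.List.pyRange 1 N 1).foldl pvStepB (0, [])
  st.2 ++ List.replicate (N - 1).toNat st.1

-- the deque's state as a function of the direction counter
def pvOrderOf (d : Int) : List Int :=
  [d, PySem.Int.mod (d + 1) 4, PySem.Int.mod (d + 2) 4, PySem.Int.mod (d + 3) 4]

lemma pvMod4_range (a : Int) : 0 ≤ PySem.Int.mod a 4 ∧ PySem.Int.mod a 4 < 4 := by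
  rw [PySem.Int.mod_eq_emod_of_pos (by norm_num)]
  exact ⟨Int.emod_nonneg a (by norm_num), Int.emod_lt_of_pos a (by norm_num)⟩

lemma pvRotL_orderOf (d : Int) (h0 : 0 ≤ d) (h4 : d < 4) :
    pvRotL (pvOrderOf d) = pvOrderOf (PySem.Int.mod (d + 1) 4) := by
  have hm : ∀ a : Int, PySem.Int.mod a 4 = a % 4 := fun a =>
    PySem.Int.mod_eq_emod_of_pos (by norm_num)
  simp only [pvRotL, pvOrderOf, hm, List.drop, List.take, List.cons_append, List.nil_append,
    List.cons.injEq]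
  refine ⟨trivial, by omega, by omega, by omega, trivial⟩

lemma pvStepA_orderOf (x : Int) (acc : List Int) (k : Int) (h0 : 0 ≤ x) (h4 : x < 4) :
    pvStepA (pvOrderOf x, acc) k
      = (pvOrderOf (PySem.Int.mod (x + 1) 4), acc ++ List.replicate k.toNat x) := by
  rw [show pvStepA (pvOrderOf x, acc) k
      = (pvRotL (pvOrderOf x), acc ++ List.replicate k.toNat x) from rfl,
    pvRotL_orderOf x h0 h4]

lemma pvLoop_eq (l : List Int) : ∀ (d : Int) (acc : List Int), 0 ≤ d → d < 4 →
    (l.flatMap (fun k => [k, k])).foldl pvStepA (pvOrderOf d, acc)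
      = (pvOrderOf (l.foldl pvStepB (d, acc)).1, (l.foldl pvStepB (d, acc)).2) := by
  induction l with
  | nil => intro d acc _ _; simp
  | cons k t ih =>
    intro d acc h0 h4
    have h1 := pvMod4_range (d + 1)
    have h2 := pvMod4_range (PySem.Int.mod (d + 1) 4 + 1)
    simp only [List.flatMap_cons, List.cons_append, List.nil_append, List.foldl_cons]
    rw [pvStepA_orderOf d acc k h0 h4,
      pvStepA_orderOf _ _ k h1.1 h1.2,
      ih _ _ h2.1 h2.2]
    simp [pvStepB, List.append_assoc]

lemma pvRevFoldA (l : List Int) : ∀ (ord acc : List Int),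
    l.foldl pvStepARev (ord, acc)
      = ((l.foldl pvStepA (ord, acc.reverse)).1,
         ((l.foldl pvStepA (ord, acc.reverse)).2).reverse) := by
  induction l with
  | nil => intro ord acc; simp
  | cons k t ih =>
    intro ord acc
    rw [List.foldl_cons, List.foldl_cons,
      show pvStepARev (ord, acc) k
        = (pvRotL ord, List.replicate k.toNat (ord.headD 0) ++ acc) from rfl,
      show pvStepA (ord, acc.reverse) k
        = (pvRotL ord, acc.reverse ++ List.replicate k.toNat (ord.headD 0)) from rfl,
      ih]
    simp [List.reverse_append]

lemma pvA_eq_pairs (N : Int) : tornado_move N = pvPairs N := by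
  show (((((PySem.List.pyRange 1 N 1).flatMap (fun k => [k, k])) ++ [N - 1]).foldl pvStepARev
        ([0, 1, 2, 3], [])).2).reverse = _
  rw [pvRevFoldA, List.reverse_reverse]
  show ((((PySem.List.pyRange 1 N 1).flatMap (fun k => [k, k])) ++ [N - 1]).foldl pvStepA
        ([0, 1, 2, 3], List.reverse [])).2 = _
  rw [List.reverse_nil, List.foldl_append, List.foldl_cons, List.foldl_nil]
  have h04 : pvOrderOf 0 = ([0, 1, 2, 3] : List Int) := by decide
  rw [← h04, pvLoop_eq (PySem.List.pyRange 1 N 1) 0 [] (by norm_num) (by norm_num)]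
  simp [pvPairs, pvStepA, pvOrderOf]

-- incremental integer square root: one conditional step per index
lemma pvSqrt_step (j : ℕ) :
    (if ((Nat.sqrt (j - 1) : ℤ) + 1) * ((Nat.sqrt (j - 1) : ℤ) + 1) ≤ (j : ℤ)
      then (Nat.sqrt (j - 1) : ℤ) + 1 else (Nat.sqrt (j - 1) : ℤ)) = (Nat.sqrt j : ℤ) := by
  rcases Nat.eq_zero_or_pos j with h0 | hp
  · subst h0; norm_num
  · set t := Nat.sqrt (j - 1) with ht
    have h1 : Nat.sqrt j ≤ t + 1 := by
      have h := Nat.sqrt_succ_le_succ_sqrt (j - 1)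
      simp only [Nat.succ_eq_add_one] at h
      rwa [Nat.sub_add_cancel hp] at h
    have h2 : t ≤ Nat.sqrt j := Nat.sqrt_le_sqrt (by omega)
    by_cases hc : (t + 1) * (t + 1) ≤ j
    · have h3 : t + 1 ≤ Nat.sqrt j := Nat.le_sqrt.mpr hc
      have : Nat.sqrt j = t + 1 := by omega
      rw [if_pos (by exact_mod_cast hc), this]; push_cast; ring
    · have h3 : Nat.sqrt j < t + 1 := Nat.sqrt_lt.mpr (by omega)
      have : Nat.sqrt j = t := by omega
      rw [if_neg (by exact_mod_cast hc), this]

lemma pvSqrt_between (n j : ℕ) (h1 : n * n ≤ j) (h2 : j < (n + 1) * (n + 1)) :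
    Nat.sqrt j = n := by
  have := Nat.le_sqrt.mpr h1
  have := Nat.sqrt_lt.mpr h2
  omega

-- evaluation of pvG on the two halves of each ring
lemma pvG_even (n i : ℕ) (h : i ≤ n) :
    pvG (n * (n + 1) + i) = PySem.Int.mod (2 * (n : ℤ)) 4 := by
  have hs : Nat.sqrt (n * (n + 1) + i) = n :=
    pvSqrt_between n _ (by nlinarith) (by nlinarith)
  simp only [pvG, hs]
  rw [if_neg (by push_cast; nlinarith)]

lemma pvG_odd (n i : ℕ) (h : i ≤ n) :
    pvG ((n + 1) * (n + 1) + i) = PySem.Int.mod (2 * (n : ℤ) + 1) 4 := by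
  have hs : Nat.sqrt ((n + 1) * (n + 1) + i) = n + 1 :=
    pvSqrt_between (n + 1) _ (by nlinarith) (by nlinarith)
  simp only [pvG, hs]
  rw [if_pos (by push_cast; nlinarith)]
  push_cast; ring_nf

lemma pvMap_range_const (f : ℕ → ℤ) (n : ℕ) (c : ℤ) (h : ∀ i < n, f i = c) :
    (List.range n).map f = List.replicate n c := by
  apply List.eq_replicate_iff.mpr
  constructor
  · simp
  · intro b hb
    rcases List.mem_map.mp hb with ⟨i, hi, rfl⟩
    exact h i (List.mem_range.mp hi)

-- B's fold computes the canonical list, carrying the cached ring state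
lemma pvBfold (M : ℕ) :
    (PySem.List.pyRange 0 (M : ℤ) 1).foldl pvStepBRev ((0, 0, 1, 3, 0), [])
      = (((Nat.sqrt (M - 1) : ℤ),
          (Nat.sqrt (M - 1) : ℤ) * ((Nat.sqrt (M - 1) : ℤ) + 1),
          ((Nat.sqrt (M - 1) : ℤ) + 1) * ((Nat.sqrt (M - 1) : ℤ) + 1),
          PySem.Int.mod (2 * (Nat.sqrt (M - 1) : ℤ) - 1) 4,
          PySem.Int.mod (2 * (Nat.sqrt (M - 1) : ℤ)) 4),
         (pvCanon M).reverse) := by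
  induction M with
  | zero => simp [pvCanon]
  | succ m ih =>
    have hsplit : PySem.List.pyRange 0 ((m : ℤ) + 1) 1
        = PySem.List.pyRange 0 (m : ℤ) 1 ++ [(m : ℤ)] :=
      PySem.List.pyRange_one_succ_right (by omega)
    rw [show ((m + 1 : ℕ) : ℤ) = (m : ℤ) + 1 by push_cast; ring, hsplit,
      List.foldl_append, ih, List.foldl_cons, List.foldl_nil, Nat.add_sub_cancel]
    have hstep := pvSqrt_step m
    have hrev : (pvCanon (m + 1)).reverse = pvG m :: (pvCanon m).reverse := by
      simp [pvCanon, List.range_succ]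
    rw [hrev]
    by_cases hc : ((Nat.sqrt (m - 1) : ℤ) + 1) * ((Nat.sqrt (m - 1) : ℤ) + 1) ≤ (m : ℤ)
    · have hq : (Nat.sqrt (m - 1) : ℤ) + 1 = (Nat.sqrt m : ℤ) := by
        rw [← hstep, if_pos hc]
      have hmid : ((Nat.sqrt (m - 1) : ℤ) + 1) * ((Nat.sqrt (m - 1) : ℤ) + 1)
            + ((Nat.sqrt (m - 1) : ℤ) + 1)
          = ((Nat.sqrt (m - 1) : ℤ) + 1) * (((Nat.sqrt (m - 1) : ℤ) + 1) + 1) := by ring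
      have hnxt : ((Nat.sqrt (m - 1) : ℤ) + 1) * ((Nat.sqrt (m - 1) : ℤ) + 1)
            + ((Nat.sqrt (m - 1) : ℤ) + 1) + ((Nat.sqrt (m - 1) : ℤ) + 1) + 1
          = (((Nat.sqrt (m - 1) : ℤ) + 1) + 1) * (((Nat.sqrt (m - 1) : ℤ) + 1) + 1) := by ring
      simp only [pvStepBRev]
      rw [if_pos hc]
      dsimp only
      refine congrArg₂ Prod.mk ?_ ?_
      · rw [← hq]
        exact congrArg₂ Prod.mk rfl
          (congrArg₂ Prod.mk (by ring) (congrArg₂ Prod.mk (by ring) rfl))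
      · congr 1
        simp only [pvG]
        rw [← hq, apply_ite (fun a : ℤ => PySem.Int.mod a 4), hmid]
    · have hq : (Nat.sqrt (m - 1) : ℤ) = (Nat.sqrt m : ℤ) := by
        rw [← hstep, if_neg hc]
      simp only [pvStepBRev]
      rw [if_neg hc]
      dsimp only
      refine congrArg₂ Prod.mk ?_ ?_
      · rw [← hq]
      · congr 1
        simp only [pvG]
        rw [← hq, apply_ite (fun a : ℤ => PySem.Int.mod a 4)]

-- the pair-run fold builds the same canonical list
lemma pvPairsFold (n : ℕ) :
    (PySem.List.pyRange 1 (1 + (n : ℤ)) 1).foldl pvStepB (0, [])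
      = (PySem.Int.mod (2 * (n : ℤ)) 4, pvCanon (n * (n + 1))) := by
  have hm : ∀ a : Int, PySem.Int.mod a 4 = a % 4 := fun a =>
    PySem.Int.mod_eq_emod_of_pos (by norm_num)
  induction n with
  | zero => simp [PySem.List.pyRange_one_eq_nil, pvCanon]
  | succ m ih =>
    have hsplit : PySem.List.pyRange 1 (1 + ((m : ℤ) + 1)) 1
        = PySem.List.pyRange 1 (1 + (m : ℤ)) 1 ++ [1 + (m : ℤ)] := by
      rw [show (1 : ℤ) + ((m : ℤ) + 1) = (1 + (m : ℤ)) + 1 by ring]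
      exact PySem.List.pyRange_one_succ_right (by omega)
    rw [show ((m + 1 : ℕ) : ℤ) = (m : ℤ) + 1 by push_cast; ring, hsplit,
      List.foldl_append, ih, List.foldl_cons, List.foldl_nil]
    simp only [pvStepB, Prod.mk.injEq]
    have htoNat : ((1 : ℤ) + (m : ℤ)).toNat = m + 1 := by omega
    have hd1 : PySem.Int.mod (PySem.Int.mod (2 * (m : ℤ)) 4 + 1) 4
        = PySem.Int.mod (2 * (m : ℤ) + 1) 4 := by simp only [hm]; omega
    have hd2 : PySem.Int.mod (PySem.Int.mod (2 * (m : ℤ) + 1) 4 + 1) 4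
        = PySem.Int.mod (2 * ((m : ℤ) + 1)) 4 := by simp only [hm]; omega
    rw [hd1]
    refine ⟨hd2, ?_⟩
    · -- canonical list of the next ring = previous ++ two constant blocks
      rw [htoNat]
      have hsum : (m + 1) * (m + 1 + 1) = m * (m + 1) + (m + 1) + (m + 1) := by ring
      conv_rhs => rw [pvCanon, hsum, List.range_add, List.range_add, List.map_append,
        List.map_append, List.map_map, List.map_map]
      congr 1
      · congr 1
        symm
        apply pvMap_range_const
        intro i hi
        simpa [Function.comp] using pvG_even m i (by omega)
      · symm
        apply pvMap_range_const
        intro i hi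
        have h2 : m * (m + 1) + (m + 1) = (m + 1) * (m + 1) := by ring
        simpa [Function.comp, h2] using pvG_odd m i (by omega)

-- ===== VERDICT (by name: the statement is the Claim_ definition above) =====
theorem tornado_move_spec : Claim_equal_tornado_move := by
  intro N _
  unfold Spec_tornado_move
  rw [pvA_eq_pairs]
  by_cases hN : N < 1
  · -- both sides are empty
    rw [tornado_move_alt, if_pos hN]
    simp [pvPairs, PySem.List.pyRange_one_eq_nil (by omega : N ≤ 1),
      show (N - 1).toNat = 0 by omega]
  · rw [not_lt] at hN
    set n : ℕ := (N - 1).toNat with hn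
    have hN' : N = 1 + (n : ℤ) := by omega
    -- B's side
    have hM : N * N - 1 = ((n * (n + 1) + n : ℕ) : ℤ) := by
      rw [hN']; push_cast; ring
    rw [tornado_move_alt, if_neg (by omega), hM, pvBfold]
    dsimp only
    rw [List.reverse_reverse]
    -- A's side (pair-run form)
    rw [pvPairs, hN', pvPairsFold]
    dsimp only
    have htail : ((1 : ℤ) + (n : ℤ) - 1).toNat = n := by omega
    rw [htail]
    -- append the tail run as the last constant block of the canonical list
    conv_rhs => rw [pvCanon, List.range_add, List.map_append, List.map_map]
    rw [pvCanon]
    congr 1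
    symm
    apply pvMap_range_const
    intro i hi
    simpa [Function.comp] using pvG_even n i (by omega)
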